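-- pv_equiv track=rewrite | github.com/jeonglee22/codingtestPractice | 프로그래머스/2/84512. 모음 사전/모음 사전.py | solution
-- ===== SOURCE A (Python) =====
-- def solution(word):
--     answer = 0
--
--     alpha = ['A', 'E', 'I', 'O', 'U']
--
--     for i in range(len(word)):
--         index = alpha.index(word[i])
--
--         for j in range(4 - i, -1, -1):
--             answer += index * (5 ** j);
--
--     answer += len(word)
--
--     return answer
-- ===== SOURCE B (Python) =====
-- def solution(word):
--     alpha = 'AEIOU'
--     total = 0
--     w = 781
--     for c in word:
--         total += alpha.index(c) * w + 1
--         w //= 5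
--     return total
-- ===== Notes on version B (the rewrite author's own statement) =====
-- stated objective: simpler
-- what changed: A's nested loops (outer over positions, inner countdown summing index*5**j) are replaced by a single pass carrying a running weight w that starts at 781 and is floor-divided by 5 after each character, adding alpha.index(c)*w + 1 per character so the final += len(word) disappears.
import Mathlib
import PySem

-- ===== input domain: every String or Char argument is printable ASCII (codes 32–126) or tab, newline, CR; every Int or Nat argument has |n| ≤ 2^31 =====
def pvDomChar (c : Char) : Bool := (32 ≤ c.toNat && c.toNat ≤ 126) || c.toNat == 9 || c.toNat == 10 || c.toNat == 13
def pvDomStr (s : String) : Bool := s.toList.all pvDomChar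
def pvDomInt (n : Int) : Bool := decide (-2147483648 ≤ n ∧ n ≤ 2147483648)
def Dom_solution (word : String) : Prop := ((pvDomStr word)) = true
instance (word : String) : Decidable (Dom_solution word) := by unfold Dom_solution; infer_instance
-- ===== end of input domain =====

-- B replaces A's nested loops by one pass with a running weight w (781, then w //= 5 each step),
-- adding index*w + 1 per character (objective: simpler).

-- ===== PORT A =====
-- literal port of A; alpha.index(word[i]) is totalized with getD 0 — Pre_ keeps word inside the vowels, where index? is some
def solution (word : String) : Int :=
  let alpha : List Char := ['A', 'E', 'I', 'O', 'U']
  let answer : Int :=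
    (PySem.List.pyRange 0 (word.toList.length) 1).foldl
      (fun answer i =>
        let index : Int := ((PySem.List.index? alpha (PySem.List.pyGetD word.toList i ' ')).getD 0 : Nat)
        (PySem.List.pyRange (4 - i) (-1) (-1)).foldl
          (fun a j => a + index * ((5 : Int) ^ j.toNat)) answer)
      0
  answer + word.toList.length

-- ===== PORT B =====
-- port of Source B: one fold over the characters carrying the pair (total, w); 'AEIOU'.index(c) totalized with getD 0 as in A's port
def solution_alt (word : String) : Int :=
  (word.toList.foldl
    (fun (p : Int × Int) c =>
      (p.1 + ((PySem.List.index? "AEIOU".toList c).getD 0 : Nat) * p.2 + 1,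
       PySem.Int.floordiv p.2 5))
    ((0 : Int), (781 : Int))).1

-- ===== PRECONDITION & SPEC =====
-- Pre_ excludes words containing a non-vowel character: there alpha.index / 'AEIOU'.index raises ValueError in Python (A and B alike).
def Pre_solution (word : String) : Prop :=
  (word.toList.all ((['A', 'E', 'I', 'O', 'U'] : List Char).contains ·)) = true
instance (word : String) : Decidable (Pre_solution word) := by unfold Pre_solution; infer_instance
def pvWitness_solution : String := "AEIOU"

def Spec_solution (word : String) (out : Int) : Prop := out = solution_alt word
instance (word : String) (out : Int) : Decidable (Spec_solution word out) := by unfold Spec_solution; infer_instance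

-- ===== CLAIM =====
def Claim_equal_solution : Prop := ∀ (word : String), Dom_solution word → Pre_solution word → Spec_solution word (solution word)

-- ===== LEMMAS AND PROOFS =====

-- the position weight: 781, 156, 31, 6, 1, then 0 forever
def pvW (i : Nat) : Int := ([781, 156, 31, 6, 1] : List Int).getD i 0

lemma pvW_div (i : Nat) : PySem.Int.floordiv (pvW i) 5 = pvW (i + 1) := by
  match i with
  | 0 => decide
  | 1 => decide
  | 2 => decide
  | 3 => decide
  | 4 => decide
  | (n + 5) => simp [pvW, PySem.Int.floordiv]

-- A's inner countdown loop adds exactly index * pvW i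
lemma inner_eq (index : Int) (i : Nat) (a : Int) :
    (PySem.List.pyRange (4 - (i : Int)) (-1) (-1)).foldl
      (fun a j => a + index * ((5 : Int) ^ j.toNat)) a
    = a + index * pvW i := by
  by_cases h : i ≤ 4
  · interval_cases i <;>
      norm_num [PySem.List.pyRange_neg_one, List.range_succ, pvW,
        show Int.toNat 1 = 1 from rfl, show Int.toNat 2 = 2 from rfl,
        show Int.toNat 3 = 3 from rfl, show Int.toNat 4 = 4 from rfl,
        show Int.toNat 5 = 5 from rfl] <;>
      ring
  · rw [PySem.List.pyRange_neg_one_eq_nil (by omega)]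
    have : pvW i = 0 := by
      unfold pvW
      rw [List.getD_eq_default]
      simp; omega
    simp [this]

-- B's fold, started at weight pvW k, computes t plus the per-position contributions of the suffix
lemma b_fold (cs : List Char) (k : Nat) (t w : Int) (hw : w = pvW k) :
    (cs.foldl
      (fun (p : Int × Int) c =>
        (p.1 + ((PySem.List.index? "AEIOU".toList c).getD 0 : Nat) * p.2 + 1,
         PySem.Int.floordiv p.2 5))
      (t, w)).1
    = (PySem.List.enumerate cs (k : Int)).foldl
        (fun a q =>
          a + ((PySem.List.index? "AEIOU".toList q.2).getD 0 : Nat) * pvW q.1.toNat + 1)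
        t := by
  induction cs generalizing k t w with
  | nil => simp
  | cons c cs ih =>
    rw [List.foldl_cons, PySem.List.enumerate_cons, List.foldl_cons]
    subst hw
    have h2 : PySem.Int.floordiv (pvW k) 5 = pvW (k + 1) := pvW_div k
    rw [h2]
    have hk : ((k : Int) + 1) = ((k + 1 : Nat) : Int) := by push_cast; ring
    rw [hk, ih (k + 1) _ _ rfl]
    simp

-- a fold whose body adds one per element absorbs a trailing + length
lemma foldl_plus_one {α : Type} (l : List α) (g : α → Int) (a : Int) :
    l.foldl (fun acc x => acc + g x + 1) a
    = l.foldl (fun acc x => acc + g x) a + l.length := by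
  have hf : (fun (acc : Int) (x : α) => acc + g x + 1) = fun acc x => acc + (g x + 1) := by
    funext acc x; ring
  have hs : ∀ (m : List α), (m.map (fun x => g x + 1)).sum = (m.map g).sum + m.length := by
    intro m
    induction m with
    | nil => simp
    | cons x m ih => simp [ih]; ring
  rw [hf, PySem.List.foldl_add, PySem.List.foldl_add, hs]
  ring

-- ===== VERDICT =====
theorem solution_spec : Claim_equal_solution := by
  intro word _ _
  unfold Spec_solution solution solution_alt
  rw [b_fold word.toList 0 0 781 rfl]
  rw [show ((0 : Nat) : Int) = 0 from rfl]
  rw [PySem.List.enumerate_eq_map_pyRange word.toList ' ']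
  dsimp only [PySem.List.len]
  rw [List.foldl_map]
  dsimp only
  have hA : ∀ (init : Int),
      (PySem.List.pyRange 0 (word.toList.length) 1).foldl
        (fun answer i =>
          (PySem.List.pyRange (4 - i) (-1) (-1)).foldl
            (fun a j => a + (((PySem.List.index? ['A','E','I','O','U']
                (PySem.List.pyGetD word.toList i ' ')).getD 0 : Nat) : Int)
                * ((5 : Int) ^ j.toNat)) answer)
        init
      = (PySem.List.pyRange 0 (word.toList.length) 1).foldl
          (fun a i =>
            a + (((PySem.List.index? ['A','E','I','O','U']
                (PySem.List.pyGetD word.toList i ' ')).getD 0 : Nat) : Int)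
                * pvW i.toNat)
          init := by
    intro init
    apply PySem.List.foldl_congr_mem
    intro acc x hx
    have hx0 : 0 ≤ x := ((PySem.List.mem_pyRange_one).1 hx).1
    have hxt : x = ((x.toNat : Nat) : Int) := by omega
    rw [hxt]
    exact inner_eq _ x.toNat acc
  rw [hA 0]
  have halpha : "AEIOU".toList = ['A','E','I','O','U'] := rfl
  rw [halpha]
  rw [foldl_plus_one]
  rw [PySem.List.length_pyRange_one]
  have hl : ((((word.toList.length : Int) - 0).toNat : Nat) : Int) = (word.toList.length : Int) := by
    omega
  rw [hl]
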